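-- pv_equiv track=rewrite | github.com/miche715/algorithm-practice | python/p_82612.py | solution
-- ===== SOURCE A (Python) =====
-- def solution(price, money, count):
--     sum = 0
--
--     for i in range(1, count + 1):
--         sum = sum + (price * i)
--
--     if money >= sum:
--         return 0
--     else:
--         return sum - money
-- ===== SOURCE B (Python) =====
-- def solution(price, money, count):
--     n = count if count > 0 else 0
--     total = price * n * (n + 1) // 2
--     return max(total - money, 0)
-- ===== Notes on version B (the rewrite author's own statement) =====
-- stated objective: faster
-- what changed: Replaces the O(count) summation loop with the closed-form arithmetic-series formula price*n*(n+1)//2 and max() for the shortfall.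
import Mathlib
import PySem

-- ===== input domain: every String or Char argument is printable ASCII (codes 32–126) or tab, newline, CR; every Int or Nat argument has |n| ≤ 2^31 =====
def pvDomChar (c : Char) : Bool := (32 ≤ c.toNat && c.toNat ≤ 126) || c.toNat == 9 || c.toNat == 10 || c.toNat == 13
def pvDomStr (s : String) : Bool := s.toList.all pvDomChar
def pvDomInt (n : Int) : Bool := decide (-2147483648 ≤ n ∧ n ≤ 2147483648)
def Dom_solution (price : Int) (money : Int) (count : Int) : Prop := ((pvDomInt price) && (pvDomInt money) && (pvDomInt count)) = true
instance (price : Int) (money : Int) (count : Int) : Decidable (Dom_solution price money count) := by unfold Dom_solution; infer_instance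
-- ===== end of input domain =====

-- B replaces A's O(count) summation loop with the closed-form series formula (faster, O(1)).

-- ===== PORT A =====
def solution (price : Int) (money : Int) (count : Int) : Int :=
  let sum := (PySem.List.pyRange 1 (count + 1) 1).foldl (fun s i => s + price * i) 0
  if money ≥ sum then 0 else sum - money

-- ===== PORT B =====
def solution_alt (price : Int) (money : Int) (count : Int) : Int :=
  let n := if count > 0 then count else 0
  let total := PySem.Int.floordiv (price * n * (n + 1)) 2
  max (total - money) 0

-- ===== PRECONDITION & SPEC =====
def Spec_solution (price : Int) (money : Int) (count : Int) (out : Int) : Prop := out = solution_alt price money count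
instance (price : Int) (money : Int) (count : Int) (out : Int) : Decidable (Spec_solution price money count out) := by unfold Spec_solution; infer_instance

-- ===== CLAIM (what is proved, stated in full; the proofs are below) =====
def Claim_equal_solution : Prop := ∀ (price : Int) (money : Int) (count : Int), Dom_solution price money count → Spec_solution price money count (solution price money count)

-- ===== LEMMAS AND PROOFS =====

theorem pv_sum_series (price : Int) (k : Nat) :
    (PySem.List.pyRange 1 ((k : Int) + 1) 1).foldl (fun s i => s + price * i) 0
      = price * k * (k + 1) / 2 := by
  induction k with
  | zero => simp [PySem.List.pyRange_one_eq_nil]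
  | succ n ih =>
    have h : (1 : Int) ≤ (n : Int) + 1 := by omega
    have : ((n + 1 : Nat) : Int) + 1 = ((n : Int) + 1) + 1 := by push_cast; ring
    rw [this, PySem.List.pyRange_one_succ_right h, List.foldl_append, ih]
    simp only [List.foldl_cons, List.foldl_nil]
    have h2 : price * (n : Int) * ((n : Int) + 1) / 2 + price * ((n : Int) + 1)
        = (price * (n : Int) * ((n : Int) + 1) + 2 * (price * ((n : Int) + 1))) / 2 := by
      omega
    push_cast
    rw [h2]
    congr 1
    ring

theorem pv_floordiv_two (x : Int) : PySem.Int.floordiv (2 * x) 2 = x := by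
  simp [PySem.Int.floordiv]

-- ===== VERDICT (by name: the statement is the Claim_ definition above) =====
theorem solution_spec : Claim_equal_solution := by
  intro price money count _
  unfold Spec_solution solution solution_alt
  by_cases hc : count > 0
  · have hk : count = ((count.toNat : Nat) : Int) := by omega
    simp only [if_pos hc]
    rw [hk, pv_sum_series]
    have heq : price * (count.toNat : Int) * ((count.toNat : Int) + 1)
        = 2 * (price * (count.toNat : Int) * ((count.toNat : Int) + 1) / 2) := by
      have : (2 : Int) ∣ price * (count.toNat : Int) * ((count.toNat : Int) + 1) := by
        rw [mul_assoc]
        exact Dvd.dvd.mul_left (Int.even_mul_succ_self (count.toNat : Int)).two_dvd _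
      omega
    rw [heq, pv_floordiv_two]
    split_ifs <;> omega
  · have : count + 1 ≤ 1 := by omega
    rw [PySem.List.pyRange_one_eq_nil this]
    simp only [List.foldl_nil, if_neg hc]
    simp [PySem.Int.floordiv]
    omega
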